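-- pv_equiv track=rewrite | github.com/Cpraveen2002/machine-translation | tokenizer.py | tokens_of_word
-- ===== SOURCE A (Python) =====
-- special_chars = [".", "•", "'", '"', "|", "।", "!", "(", ")", ",", "&", "@", "-", "“", "”", "—", "-", ":", ";", "‘", "’", "\xa0", "\u200c", "\u200d", "\n"]
--
-- def tokens_of_word(word):
--     word = word.lower()
--     for char in special_chars:
--         word = word.replace(char, " ")
--     return_words = []
--     for split in word.split(" "):
--         # try:
--         #     if split[-2:] == "’s" or split[-2:] == "'s":
--         #         split = split[:-1]
--         # except:
--         #     split = split
--         if split == "" or split == " ":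
--             continue
--         # if split in stop_list:
--         #     continue
--         return_words.append(split)
--     return return_words
-- ===== SOURCE B (Python) =====
-- special_chars = [".", "•", "'", '"', "|", "।", "!", "(", ")", ",", "&", "@", "-", "“", "”", "—", "-", ":", ";", "‘", "’", "\xa0", "\u200c", "\u200d", "\n"]
--
-- def tokens_of_word(word):
--     # single left-to-right scan with a token buffer instead of 25 replace passes + split
--     delims = set(special_chars) | {" "}
--     tokens = []
--     buf = []
--     for ch in word.lower():
--         if ch in delims:
--             if buf:
--                 tokens.append("".join(buf))
--                 buf = []
--         else:
--             buf.append(ch)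
--     if buf:
--         tokens.append("".join(buf))
--     return tokens
-- ===== Notes on version B (the rewrite author's own statement) =====
-- stated objective: alternative
-- what changed: Replaces 25 str.replace passes plus split-and-filter with one left-to-right character scan over the lowercased word, maintaining a token buffer and a delimiter set built once.
import Mathlib
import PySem

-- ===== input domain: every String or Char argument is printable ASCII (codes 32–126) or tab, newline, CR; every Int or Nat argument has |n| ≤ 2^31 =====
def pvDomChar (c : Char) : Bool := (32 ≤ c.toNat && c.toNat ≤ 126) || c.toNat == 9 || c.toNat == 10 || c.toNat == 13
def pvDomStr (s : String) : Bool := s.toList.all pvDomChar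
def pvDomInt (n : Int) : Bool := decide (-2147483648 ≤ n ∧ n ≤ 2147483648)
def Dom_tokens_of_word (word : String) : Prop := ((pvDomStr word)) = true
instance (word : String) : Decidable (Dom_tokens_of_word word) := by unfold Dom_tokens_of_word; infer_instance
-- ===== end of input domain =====

-- B replaces A's 25 str.replace passes + split/filter by a single character scan with a token
-- buffer and a delimiter set built once; same return value on every input.


-- ===== PORT A =====
-- special_chars (module constant; each entry is a single character)
def pvSpecials : List String := [".", "•", "'", "\"", "|", "।", "!", "(", ")", ",", "&", "@", "-", "“", "”", "—", "-", ":", ";", "‘", "’", "\u00A0", "\u200C", "\u200D", "\n"]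

def tokens_of_word (word : String) : List String :=
  let w := PySem.Str.lower word
  let w := pvSpecials.foldl (fun w c => PySem.Str.replace w c " ") w
  -- word.split(" "): the separator " " is non-empty, so Python's split always returns (split? is `some` here)
  let parts := (PySem.Str.split? w " ").getD []
  parts.foldl (fun acc s => if s == "" || s == " " then acc else acc ++ [s]) []

-- ===== PORT B =====
-- the same special characters, as characters (B's scan looks at the word's characters)
def pvSpecialsC : List Char := ['.', '•', '\'', '"', '|', '।', '!', '(', ')', ',', '&', '@', '-', '“', '”', '—', '-', ':', ';', '‘', '’', '\u00A0', '\u200C', '\u200D', '\n']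
-- delims = set(special_chars) | {" "}
def pvDelims : PySem.Set Char := PySem.Set.union (PySem.Set.ofList pvSpecialsC) (PySem.Set.ofList [' '])

def tokens_of_word_alt (word : String) : List String :=
  let st := (PySem.Str.lower word).toList.foldl
    (fun (st : List String × List Char) ch =>
      if ch ∈ pvDelims then
        if st.2.isEmpty then st else (st.1 ++ [String.ofList st.2], [])
      else (st.1, st.2 ++ [ch])) ([], [])
  if st.2.isEmpty then st.1 else st.1 ++ [String.ofList st.2]

-- ===== PRECONDITION & SPEC =====
def Spec_tokens_of_word (word : String) (out : List String) : Prop := out = tokens_of_word_alt word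
instance (word : String) (out : List String) : Decidable (Spec_tokens_of_word word out) := by unfold Spec_tokens_of_word; infer_instance

-- ===== CLAIM (what is proved, stated in full; the proofs are below) =====
def Claim_equal_tokens_of_word : Prop := ∀ (word : String), Dom_tokens_of_word word → Spec_tokens_of_word word (tokens_of_word word)

-- ===== LEMMAS AND PROOFS =====

-- map each special character to ' ' (the effect of A's chain of replaces)
def pvMd (c : Char) : Char := if c ∈ pvSpecialsC then ' ' else c

-- reference: split a char list on ' ' (the pieces of str.split(" "), left to right)
def pvSplitSp : List Char → List (List Char)
  | [] => [[]]
  | c :: t => if c = ' ' then [] :: pvSplitSp t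
              else match pvSplitSp t with
                   | [] => [[c]]
                   | h :: tl => (c :: h) :: tl

-- keep a piece iff it is neither "" nor " " (A's filter)
def pvKeep (l : List Char) : Bool := !(l == [] || l == [' '])

-- reference for B's scan: the tokens of cs given the current buffer
def pvBTok : List Char → List Char → List (List Char)
  | [], buf => if buf.isEmpty then [] else [buf]
  | c :: t, buf =>
      if c ∈ pvDelims then (if buf.isEmpty then pvBTok t [] else buf :: pvBTok t [])
      else pvBTok t (buf ++ [c])

theorem pvSplitSp_ne_nil (cs : List Char) : pvSplitSp cs ≠ [] := by
  cases cs with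
  | nil => simp [pvSplitSp]
  | cons c t => simp only [pvSplitSp]; split; · simp
                split <;> simp

theorem pv_mem_delims (c : Char) : c ∈ pvDelims ↔ c ∈ pvSpecialsC ∨ c = ' ' := by
  rw [pvDelims, PySem.Set.mem_union]
  simp [PySem.Set.mem_ofList]

theorem pv_modifyHead_idfun {α : Type} (l : List α) : List.modifyHead (fun x => x) l = l := by
  cases l <;> simp

-- replacing one character by ' ' is a map
theorem pv_replace_go (a : Char) (l acc : List Char) (fuel : Nat) (h : l.length ≤ fuel) :
    PySem.Chars.replace.go [a] [' '] fuel l acc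
      = acc.reverse ++ l.map (fun c => if c = a then ' ' else c) := by
  induction l generalizing acc fuel with
  | nil => cases fuel <;> simp [PySem.Chars.replace.go]
  | cons c t ih =>
    cases fuel with
    | zero => simp at h
    | succ f =>
      simp only [PySem.Chars.replace.go]
      by_cases hca : a = c
      · subst hca
        simp only [List.isPrefixOf, BEq.rfl, Bool.true_and, if_true, List.length_cons,
          List.length_nil, Nat.zero_add, List.drop_succ_cons, List.drop_zero]
        rw [ih _ f (by simpa using Nat.le_of_succ_le_succ h)]
        simp
      · rw [if_neg (by simp [List.isPrefixOf, hca])]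
        rw [ih _ f (by simpa using Nat.le_of_succ_le_succ h)]
        simp [Ne.symm hca]

theorem pv_replace_single (cs : List Char) (a : Char) :
    PySem.Chars.replace cs [a] [' '] = cs.map (fun c => if c = a then ' ' else c) := by
  rw [PySem.Chars.replace, if_neg (by simp)]
  simpa using pv_replace_go a cs [] cs.length le_rfl

-- the chain of single-char replaces is one map
theorem pv_foldl_replace (as : List Char) (L : List Char) :
    List.foldl (fun l a => PySem.Chars.replace l [a] [' ']) L as
      = L.map (fun c => if c ∈ as then ' ' else c) := by
  induction as generalizing L with
  | nil => simp
  | cons a t ih =>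
    rw [List.foldl_cons, pv_replace_single, ih, List.map_map]
    refine List.map_congr_left ?_
    intro c _
    by_cases h1 : c = a <;> by_cases h2 : c ∈ t <;> simp [h1, h2, Function.comp]

-- splitOn with separator " " is pvSplitSp
theorem pv_splitOn_go (l cur : List Char) (acc : List (List Char)) (fuel : Nat)
    (h : l.length ≤ fuel) :
    PySem.Chars.splitOn.go [' '] fuel l cur acc
      = acc.reverse ++ (pvSplitSp l).modifyHead (cur.reverse ++ ·) := by
  induction l generalizing cur acc fuel with
  | nil => cases fuel <;> simp [PySem.Chars.splitOn.go, pvSplitSp]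
  | cons c t ih =>
    cases fuel with
    | zero => simp at h
    | succ f =>
      simp only [PySem.Chars.splitOn.go]
      by_cases hc : c = ' '
      · subst hc
        rw [if_pos (by simp [List.isPrefixOf])]
        simp only [List.length_cons, List.length_nil, Nat.zero_add, List.drop_succ_cons,
          List.drop_zero]
        rw [ih _ _ f (by simpa using Nat.le_of_succ_le_succ h)]
        simp [pvSplitSp, pv_modifyHead_idfun]
      · rw [if_neg (by simp [List.isPrefixOf, Ne.symm hc])]
        rw [ih _ _ f (by simpa using Nat.le_of_succ_le_succ h)]
        simp only [pvSplitSp, if_neg hc]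
        cases hs : pvSplitSp t with
        | nil => exact absurd hs (pvSplitSp_ne_nil t)
        | cons hd tl => simp

theorem pv_splitOn_eq (cs : List Char) :
    PySem.Chars.splitOn cs [' '] = pvSplitSp cs := by
  rw [PySem.Chars.splitOn, pv_splitOn_go _ _ _ _ (by omega)]
  simp [pv_modifyHead_idfun]

theorem pvKeep_nil : pvKeep [] = false := by simp [pvKeep]

theorem pvKeep_of (l : List Char) (h1 : l ≠ []) (h2 : ' ' ∉ l) : pvKeep l = true := by
  have h3 : l ≠ [' '] := fun h => h2 (h ▸ by simp)
  simp [pvKeep, h1, h3]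

-- B's scan computes exactly the kept pieces of the split of the mapped list
theorem pv_bTok_eq (cs : List Char) (buf : List Char) (hbuf : ' ' ∉ buf) :
    pvBTok cs buf = ((pvSplitSp (cs.map pvMd)).modifyHead (buf ++ ·)).filter pvKeep := by
  induction cs generalizing buf with
  | nil =>
    simp only [pvBTok, List.map_nil, pvSplitSp, List.modifyHead_cons, List.append_nil,
      List.filter_cons]
    cases buf with
    | nil => simp [pvKeep_nil]
    | cons b bs => simp [pvKeep_of (b :: bs) (by simp) hbuf]
  | cons c t ih =>
    by_cases hd : c ∈ pvDelims
    · have hmd : pvMd c = ' ' := by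
        rcases (pv_mem_delims c).1 hd with h | h
        · simp [pvMd, h]
        · simp [pvMd, h]
      have htail : pvBTok t [] = (pvSplitSp (t.map pvMd)).filter pvKeep := by
        rw [ih [] (by simp)]
        cases hs : pvSplitSp (t.map pvMd) with
        | nil => exact absurd hs (pvSplitSp_ne_nil _)
        | cons h tl => simp
      rw [show pvBTok (c :: t) buf
            = if c ∈ pvDelims then (if buf.isEmpty then pvBTok t [] else buf :: pvBTok t [])
              else pvBTok t (buf ++ [c]) from rfl, if_pos hd]
      simp only [List.map_cons, hmd, pvSplitSp]
      cases hb : buf with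
      | nil => simpa [pvKeep_nil] using htail
      | cons b bs =>
        rw [if_neg (by simp), htail]
        simp [pvKeep_of (b :: bs) (by simp) (hb ▸ hbuf)]
    · have hc : c ≠ ' ' := fun h => hd ((pv_mem_delims c).2 (Or.inr h))
      have hmd : pvMd c = c := by
        simp only [pvMd, ite_eq_right_iff]
        intro hmem; exact absurd ((pv_mem_delims c).2 (Or.inl hmem)) hd
      rw [show pvBTok (c :: t) buf
            = if c ∈ pvDelims then (if buf.isEmpty then pvBTok t [] else buf :: pvBTok t [])
              else pvBTok t (buf ++ [c]) from rfl, if_neg hd,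
          ih (buf ++ [c]) (by simp [hbuf, Ne.symm hc])]
      simp only [List.map_cons, hmd, pvSplitSp, if_neg hc]
      cases hs : pvSplitSp (t.map pvMd) with
      | nil => exact absurd hs (pvSplitSp_ne_nil _)
      | cons h tl => simp

-- B's foldl with the final flush is pvBTok
theorem pv_foldB (cs : List Char) (acc : List String) (buf : List Char) :
    (let st := cs.foldl
        (fun (st : List String × List Char) ch =>
          if ch ∈ pvDelims then
            if st.2.isEmpty then st else (st.1 ++ [String.ofList st.2], [])
          else (st.1, st.2 ++ [ch])) (acc, buf)
     if st.2.isEmpty then st.1 else st.1 ++ [String.ofList st.2])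
      = acc ++ (pvBTok cs buf).map String.ofList := by
  induction cs generalizing acc buf with
  | nil =>
    simp only [List.foldl_nil, pvBTok]
    cases buf <;> simp
  | cons c t ih =>
    by_cases hd : c ∈ pvDelims
    · cases buf with
      | nil => simpa [hd, pvBTok] using ih acc []
      | cons b bs => simpa [hd, pvBTok] using ih (acc ++ [String.ofList (b :: bs)]) []
    · simpa [hd, pvBTok] using ih acc (buf ++ [c])

theorem pv_ofList_beq (l : List Char) (s : String) : (String.ofList l == s) = (l == s.toList) := by
  by_cases h : l = s.toList
  · subst h; simp [String.ofList_toList]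
  · have h2 : String.ofList l ≠ s := fun he => h (by rw [← he, String.toList_ofList])
    simp [h, h2]

set_option maxRecDepth 8192 in
theorem tokens_of_word_eq (word : String) : tokens_of_word word = tokens_of_word_alt word := by
  have hW : (pvSpecials.foldl (fun w c => PySem.Str.replace w c " ") (PySem.Str.lower word)).toList
      = ((PySem.Str.lower word).toList).map pvMd := by
    have hb : ∀ (w : String), (pvSpecials.foldl (fun w c => PySem.Str.replace w c " ") w).toList
        = List.foldl (fun l a => PySem.Chars.replace l [a] [' ']) w.toList pvSpecialsC := by
      intro w
      simp [pvSpecials, pvSpecialsC, List.foldl, PySem.Str.replace]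
    rw [hb, pv_foldl_replace]
    rfl
  have hB : tokens_of_word_alt word
      = ((pvSplitSp (((PySem.Str.lower word).toList).map pvMd)).filter pvKeep).map String.ofList := by
    rw [show tokens_of_word_alt word
          = [] ++ (pvBTok (PySem.Str.lower word).toList []).map String.ofList
        from pv_foldB _ [] []]
    rw [pv_bTok_eq _ [] (by simp)]
    simp [pv_modifyHead_idfun]
  have hsplit : (PySem.Str.split? (pvSpecials.foldl (fun w c => PySem.Str.replace w c " ")
        (PySem.Str.lower word)) " ").getD []
      = (pvSplitSp (((PySem.Str.lower word).toList).map pvMd)).map String.ofList := by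
    simp [PySem.Str.split?, PySem.Chars.split?, hW, pv_splitOn_eq]
  have hf : (fun (acc : List String) (s : String) => if s == "" || s == " " then acc else acc ++ [s])
      = (fun acc s => if (!(s == "" || s == " ")) = true then acc ++ [s] else acc) := by
    funext acc s; by_cases h : (s == "" || s == " ") = true
    · simp [h]
    · simp [h]
  rw [show tokens_of_word word
        = ((PySem.Str.split? (pvSpecials.foldl (fun w c => PySem.Str.replace w c " ")
            (PySem.Str.lower word)) " ").getD []).foldl
            (fun acc s => if s == "" || s == " " then acc else acc ++ [s]) [] from rfl,
      hsplit, hf, PySem.List.foldl_append_if (fun s => !(s == "" || s == " ")) (fun s => s),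
      List.filter_map, hB]
  simp only [List.nil_append, List.map_id']
  refine congrArg (List.map String.ofList) (List.filter_congr ?_)
  intro l _
  simp [Function.comp, pvKeep, pv_ofList_beq]

-- ===== VERDICT (by name: the statement is the Claim_ definition above) =====
theorem tokens_of_word_spec : Claim_equal_tokens_of_word := by
  intro word _
  exact tokens_of_word_eq word
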